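-- pv_equiv track=rewrite | github.com/Former-Stranger/concert-website | scripts/preview_duplicates.py | normalize_artist_name
-- ===== SOURCE A (Python) =====
-- def normalize_artist_name(name):
--     """Normalize artist name for comparison"""
--     normalized = name.lower()
--     normalized = ''.join(c if c.isalnum() or c.isspace() else '' for c in normalized)
--     normalized = ' '.join(normalized.split())
--     for article in ['the ', 'a ', 'an ']:
--         if normalized.startswith(article):
--             normalized = normalized[len(article):]
--             break
--     return normalized.strip()
-- ===== SOURCE B (Python) =====
-- def normalize_artist_name(name):
--     """Normalize artist name for comparison"""
--     filtered = ''.join(c for c in name.lower() if c.isalnum() or c.isspace())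
--     words = filtered.split()
--     if len(words) > 1 and words[0] in ('the', 'a', 'an'):
--         words = words[1:]
--     return ' '.join(words)
-- ===== Notes on version B (the rewrite author's own statement) =====
-- stated objective: simpler
-- what changed: B works on the token list: filter characters, split into words, drop a leading article word by membership test, and join once - replacing A's collapse-join, startswith loop over article prefixes, slicing and final strip.
import Mathlib
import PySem

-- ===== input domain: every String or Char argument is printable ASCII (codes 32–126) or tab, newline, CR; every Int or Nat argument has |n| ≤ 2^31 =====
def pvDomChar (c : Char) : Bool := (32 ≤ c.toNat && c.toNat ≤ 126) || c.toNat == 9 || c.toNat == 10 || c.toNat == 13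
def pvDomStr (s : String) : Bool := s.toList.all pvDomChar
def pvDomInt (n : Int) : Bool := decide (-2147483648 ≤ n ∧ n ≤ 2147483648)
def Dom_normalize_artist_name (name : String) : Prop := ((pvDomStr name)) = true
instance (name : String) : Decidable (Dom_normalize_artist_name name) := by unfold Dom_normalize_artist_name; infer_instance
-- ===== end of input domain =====

-- B replaces A's collapse-join / startswith-prefix loop / slice / final strip by a token-list
-- transformation (split once, drop a leading article word, join once); same result, simpler.

-- ===== PORT A =====
-- the for-loop over ['the ', 'a ', 'an '] with break
def pvArticleLoop (normalized : String) : List String → String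
  | [] => normalized
  | article :: rest =>
    if PySem.Str.startswith normalized article then
      PySem.Str.slice normalized (some (PySem.Str.len article)) none
    else pvArticleLoop normalized rest

def normalize_artist_name (name : String) : String :=
  let normalized := PySem.Str.lower name
  let normalized := PySem.Str.join ""
    (normalized.toList.map (fun c =>
      if PySem.Chars.isalnum c || PySem.Chars.isspace c then String.ofList [c] else ""))
  let normalized := PySem.Str.join " " (PySem.Str.split₀ normalized)
  let normalized := pvArticleLoop normalized ["the ", "a ", "an "]
  PySem.Str.strip normalized

-- ===== PORT B =====
def normalize_artist_name_alt (name : String) : String :=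
  let filtered := String.ofList
    ((PySem.Str.lower name).toList.filter (fun c =>
      PySem.Chars.isalnum c || PySem.Chars.isspace c))
  let words := PySem.Str.split₀ filtered
  let words :=
    if decide (1 < words.length) &&
        (["the", "a", "an"].contains ((PySem.List.pyGet? words 0).getD "")) then
      PySem.List.slice words (some 1) none
    else words
  PySem.Str.join " " words

-- ===== PRECONDITION & SPEC =====
def Spec_normalize_artist_name (name : String) (out : String) : Prop := out = normalize_artist_name_alt name
instance (name : String) (out : String) : Decidable (Spec_normalize_artist_name name out) := by unfold Spec_normalize_artist_name; infer_instance

-- ===== CLAIM (what is proved, stated in full; the proofs are below) =====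
def Claim_equal_normalize_artist_name : Prop := ∀ (name : String), Dom_normalize_artist_name name → Spec_normalize_artist_name name (normalize_artist_name name)

-- ===== LEMMAS AND PROOFS =====

def pvKeep (c : Char) : Bool := PySem.Chars.isalnum c || PySem.Chars.isspace c

def pvGood (ws : List (List Char)) : Prop :=
  ∀ w ∈ ws, w ≠ [] ∧ ∀ c ∈ w, PySem.Chars.isspace c = false

set_option maxRecDepth 4000

lemma pv_join_filter (cs : List Char) :
    PySem.Chars.join [] (cs.map (fun c => if pvKeep c then [c] else [])) = cs.filter pvKeep := by
  induction cs with
  | nil => rfl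
  | cons c cs ih =>
    simp only [List.map_cons, List.filter_cons, PySem.Chars.join, List.intercalate] at *
    cases h : pvKeep c <;> simp [h] at * <;> cases cs <;> simp_all

lemma pv_join_cons₂ (w : List Char) (ws : List (List Char)) (h : ws ≠ []) :
    PySem.Chars.join [' '] (w :: ws) = w ++ ' ' :: PySem.Chars.join [' '] ws := by
  cases ws with
  | nil => simp at h
  | cons v t => simp [PySem.Chars.join, List.intercalate, List.intersperse]

lemma pv_join_singleton (w : List Char) : PySem.Chars.join [' '] [w] = w := by
  simp [PySem.Chars.join, List.intercalate]

lemma pv_join_ne_nil (ws : List (List Char)) (h : pvGood ws) (hne : ws ≠ []) :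
    PySem.Chars.join [' '] ws ≠ [] := by
  cases ws with
  | nil => simp at hne
  | cons w t =>
    have hw := (h w (by simp)).1
    cases t with
    | nil => simpa [pv_join_singleton] using hw
    | cons v t' => simp [pv_join_cons₂ w (v::t') (by simp), hw]

lemma pv_dropWhile_of_none {p : Char → Bool} (l : List Char) (h : ∀ c ∈ l, p c = false) :
    List.dropWhile p l = l := by
  cases l with
  | nil => rfl
  | cons c t => simp [List.dropWhile, h c (by simp)]

lemma pv_lstrip_join (ws : List (List Char)) (h : pvGood ws) :
    PySem.Chars.lstrip (PySem.Chars.join [' '] ws) = PySem.Chars.join [' '] ws := by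
  cases ws with
  | nil => rfl
  | cons w t =>
    obtain ⟨hw, hsp⟩ := h w (by simp)
    obtain ⟨c, w', rfl⟩ : ∃ c w', w = c :: w' := by
      cases w with | nil => simp at hw | cons c w' => exact ⟨c, w', rfl⟩
    have hc := hsp c (by simp)
    cases t with
    | nil => simp [PySem.Chars.lstrip, hc]
    | cons v t' =>
      rw [pv_join_cons₂ _ _ (by simp)]
      simp [PySem.Chars.lstrip, hc]

lemma pv_rstrip_join (ws : List (List Char)) (h : pvGood ws) :
    PySem.Chars.rstrip (PySem.Chars.join [' '] ws) = PySem.Chars.join [' '] ws := by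
  induction ws with
  | nil => rfl
  | cons w t ih =>
    obtain ⟨hw, hsp⟩ := h w (by simp)
    cases t with
    | nil =>
      rw [pv_join_singleton]
      unfold PySem.Chars.rstrip
      rw [pv_dropWhile_of_none _ (fun c hc => hsp c (by simpa using hc))]
      simp
    | cons v t' =>
      have hgt : pvGood (v :: t') := fun x hx => h x (by simp [hx])
      have iht := ih hgt
      have hJne : PySem.Chars.join [' '] (v :: t') ≠ [] := pv_join_ne_nil _ hgt (by simp)
      rw [pv_join_cons₂ _ _ (by simp)]
      unfold PySem.Chars.rstrip at *
      have hdw : List.dropWhile PySem.Chars.isspace (PySem.Chars.join [' '] (v :: t')).reverse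
          = (PySem.Chars.join [' '] (v :: t')).reverse := by
        have := congrArg List.reverse iht
        simpa using this
      rw [show (w ++ ' ' :: PySem.Chars.join [' '] (v :: t')).reverse
            = (PySem.Chars.join [' '] (v :: t')).reverse ++ (' ' :: w.reverse) by simp]
      rw [List.dropWhile_append, hdw]
      have : ((PySem.Chars.join [' '] (v :: t')).reverse).isEmpty = false := by
        simpa [List.isEmpty_iff] using hJne
      simp [this]

lemma pv_strip_join (ws : List (List Char)) (h : pvGood ws) :
    PySem.Chars.strip (PySem.Chars.join [' '] ws) = PySem.Chars.join [' '] ws := by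
  unfold PySem.Chars.strip
  rw [pv_lstrip_join ws h, pv_rstrip_join ws h]

lemma pv_go_good (s : List Char) : ∀ (cur : List Char) (acc : List (List Char)),
    (∀ w ∈ acc, w ≠ [] ∧ ∀ c ∈ w, PySem.Chars.isspace c = false) →
    (∀ c ∈ cur, PySem.Chars.isspace c = false) →
    pvGood (PySem.Chars.split₀.go s cur acc) := by
  induction s with
  | nil =>
    intro cur acc hacc hcur
    rw [PySem.Chars.split₀.go]
    by_cases h : cur.isEmpty
    · simp [h]; intro w hw; exact hacc w (by simpa using hw)
    · simp [h]
      intro w hw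
      simp at hw
      rcases hw with hw | rfl
      · exact hacc w hw
      · refine ⟨by simpa [List.isEmpty_iff] using h, ?_⟩
        intro c hc; exact hcur c (by simpa using hc)
  | cons c rest ih =>
    intro cur acc hacc hcur
    rw [PySem.Chars.split₀.go]
    by_cases hs : PySem.Chars.isspace c = true
    · by_cases he : cur.isEmpty
      · simp [hs, he]; exact ih [] acc hacc (by simp)
      · simp [hs, he]
        refine ih [] _ ?_ (by simp)
        intro w hw
        simp at hw
        rcases hw with rfl | hw
        · exact ⟨by simpa [List.isEmpty_iff] using he, fun x hx => hcur x (by simpa using hx)⟩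
        · exact hacc w hw
    · simp [hs]
      refine ih (c :: cur) acc hacc ?_
      intro x hx
      rcases List.mem_cons.mp hx with rfl | hx
      · simpa using hs
      · exact hcur x hx

lemma pv_split₀_good (cs : List Char) : pvGood (PySem.Chars.split₀ cs) :=
  pv_go_good cs [] [] (by simp) (by simp)

lemma pv_startswith_single (w a : List Char) (hw : ∀ c ∈ w, PySem.Chars.isspace c = false) :
    (a ++ [' ']).isPrefixOf w = false := by
  by_contra h
  have hp : (a ++ [' ']) <+: w := by
    rw [← List.isPrefixOf_iff_prefix]; revert h; cases (a ++ [' ']).isPrefixOf w <;> simp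
  have : ' ' ∈ w := hp.subset (by simp)
  have := hw _ this
  simp [PySem.Chars.isspace] at this

lemma pv_startswith_word (w a t : List Char)
    (hw : ∀ c ∈ w, PySem.Chars.isspace c = false)
    (ha : ∀ c ∈ a, PySem.Chars.isspace c = false) :
    (a ++ [' ']).isPrefixOf (w ++ ' ' :: t) = (w == a) := by
  induction a generalizing w with
  | nil =>
    cases w with
    | nil => simp [List.isPrefixOf]
    | cons c w' =>
      have hs := hw c (by simp)
      have hc : (' ' == c) = false := by
        by_contra h; simp at h; subst h; simp [PySem.Chars.isspace] at hs
      simp only [List.nil_append, List.cons_append, List.isPrefixOf, hc, Bool.false_and]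
      simp
  | cons b a' ih =>
    cases w with
    | nil =>
      have hs := ha b (by simp)
      have hc : (b == ' ') = false := by
        by_contra h; simp at h; subst h; simp [PySem.Chars.isspace] at hs
      simp only [List.cons_append, List.nil_append, List.isPrefixOf, hc, Bool.false_and]
      simp
    | cons c w' =>
      simp only [List.cons_append, List.isPrefixOf]
      rw [ih w' (fun x hx => hw x (by simp [hx])) (fun x hx => ha x (by simp [hx]))]
      cases hbc : (b == c) <;> simp_all [Bool.beq_comm]

lemma pv_sw_str (w t : List Char) (a : String) (hw : ∀ c ∈ w, PySem.Chars.isspace c = false)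
    (ha : ∀ c ∈ a.toList, PySem.Chars.isspace c = false) :
    PySem.Str.startswith (String.ofList (w ++ ' ' :: t)) (a ++ " ") = (w == a.toList) := by
  have h1 : (a ++ " ").toList = a.toList ++ [' '] := by
    simp [String.toList_append]
  simp only [PySem.Str.startswith, PySem.Chars.startswith, String.toList_ofList, h1]
  exact pv_startswith_word w a.toList t hw ha

set_option maxRecDepth 4000

lemma pv_str_join (ws : List (List Char)) :
    PySem.Str.join " " (ws.map String.ofList) = String.ofList (PySem.Chars.join [' '] ws) := by
  simp only [PySem.Str.join, List.map_map]
  have h : (String.toList ∘ String.ofList) = id := funext (fun l => by simp)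
  rw [h, List.map_id]
  rfl

lemma pv_core (ws : List (List Char)) (h : pvGood ws) :
    PySem.Str.strip (pvArticleLoop (PySem.Str.join " " (ws.map String.ofList)) ["the ", "a ", "an "]) =
    PySem.Str.join " "
      (if decide (1 < (ws.map String.ofList).length) &&
          (["the", "a", "an"].contains ((PySem.List.pyGet? (ws.map String.ofList) 0).getD "")) then
        PySem.List.slice (ws.map String.ofList) (some 1) none
      else ws.map String.ofList) := by
  match ws with
  | [] => decide
  | [w] =>
    obtain ⟨hw, hsp⟩ := h w (by simp)
    have hJ : PySem.Str.join " " ([w].map String.ofList) = String.ofList w := by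
      rw [pv_str_join, pv_join_singleton]
    rw [hJ]
    have hsw : ∀ a : String, PySem.Str.startswith (String.ofList w) (a ++ " ") = false := by
      intro a
      have h1 : (a ++ " ").toList = a.toList ++ [' '] := by simp [String.toList_append]
      simp only [PySem.Str.startswith, PySem.Chars.startswith, String.toList_ofList, h1]
      exact pv_startswith_single w a.toList hsp
    have e1 := hsw "the"; have e2 := hsw "a"; have e3 := hsw "an"
    simp only [show ("the":String) ++ " " = "the " from rfl, show ("a":String) ++ " " = "a " from rfl,
      show ("an":String) ++ " " = "an " from rfl] at e1 e2 e3
    simp only [pvArticleLoop, e1, e2, e3, Bool.false_eq_true, if_false]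
    have : PySem.Str.strip (String.ofList w) = String.ofList w := by
      have := pv_strip_join [w] h
      rw [pv_join_singleton] at this
      simp [PySem.Str.strip, String.toList_ofList, this]
    rw [this]
    simpa using hJ.symm
  | w :: v :: t =>
    obtain ⟨hw, hsp⟩ := h w (by simp)
    have hgt : pvGood (v :: t) := fun x hx => h x (by simp [hx])
    set T := PySem.Chars.join [' '] (v :: t) with hT
    have hJ : PySem.Str.join " " ((w :: v :: t).map String.ofList) = String.ofList (w ++ ' ' :: T) := by
      rw [pv_str_join, pv_join_cons₂ w (v::t) (by simp), hT]
    rw [hJ]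
    have hsw : ∀ a : String, (∀ c ∈ a.toList, PySem.Chars.isspace c = false) →
        PySem.Str.startswith (String.ofList (w ++ ' ' :: T)) (a ++ " ") = (w == a.toList) := by
      intro a ha; exact pv_sw_str w T a hsp ha
    have hthe : ∀ c ∈ ("the":String).toList, PySem.Chars.isspace c = false := by
      rw [show ("the":String).toList = ['t','h','e'] by decide]; intro c hc; fin_cases hc <;> decide
    have ha : ∀ c ∈ ("a":String).toList, PySem.Chars.isspace c = false := by
      rw [show ("a":String).toList = ['a'] by decide]; intro c hc; fin_cases hc <;> decide
    have han : ∀ c ∈ ("an":String).toList, PySem.Chars.isspace c = false := by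
      rw [show ("an":String).toList = ['a','n'] by decide]; intro c hc; fin_cases hc <;> decide
    have e1 := hsw "the" hthe; have e2 := hsw "a" ha; have e3 := hsw "an" han
    simp only [show ("the":String) ++ " " = "the " from rfl, show ("a":String) ++ " " = "a " from rfl,
      show ("an":String) ++ " " = "an " from rfl] at e1 e2 e3
    have hstripT : PySem.Str.strip (String.ofList T) = String.ofList T := by
      simp [PySem.Str.strip, String.toList_ofList, hT, pv_strip_join (v::t) hgt]
    have hjoinT : PySem.Str.join " " ((v :: t).map String.ofList) = String.ofList T := by
      rw [pv_str_join, hT]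
    have hslice : PySem.List.slice ((w :: v :: t).map String.ofList) (some 1) none
        = (v :: t).map String.ofList := by
      simpa using PySem.List.slice_from_one ((w :: v :: t).map String.ofList)
    have hget : (PySem.List.pyGet? ((w :: v :: t).map String.ofList) 0).getD "" = String.ofList w := by
      rw [show (0:Int) = ((0:Nat):Int) from rfl, PySem.List.pyGet?_natCast]; rfl
    by_cases h1 : w = "the".toList
    · subst h1
      simp only [pvArticleLoop, e1, beq_self_eq_true, if_true]
      have : PySem.Str.slice (String.ofList ("the".toList ++ ' ' :: T)) (some (PySem.Str.len "the ")) none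
          = String.ofList T := by
        simp only [PySem.Str.slice, String.toList_ofList, PySem.Chars.slice_eq_listSlice]
        rw [show PySem.Str.len "the " = ((4:Nat):Int) from by decide, PySem.List.slice_from_natCast]
        simp
      rw [this, hstripT]
      have hcond : (decide (1 < (List.map String.ofList ("the".toList :: v :: t)).length) &&
          ["the", "a", "an"].contains ((PySem.List.pyGet? (List.map String.ofList ("the".toList :: v :: t)) 0).getD "")) = true := by
        rw [hget]; simp
      simp only [hcond]
      rw [if_pos trivial, hslice, hjoinT]
    · by_cases h2 : w = "a".toList
      · subst h2
        simp only [pvArticleLoop, e1, e2, beq_self_eq_true, if_true, Bool.false_eq_true,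
          show (("a".toList : List Char) == "the".toList) = false from by decide, if_false]
        have : PySem.Str.slice (String.ofList ("a".toList ++ ' ' :: T)) (some (PySem.Str.len "a ")) none
            = String.ofList T := by
          simp only [PySem.Str.slice, String.toList_ofList, PySem.Chars.slice_eq_listSlice]
          rw [show PySem.Str.len "a " = ((2:Nat):Int) from by decide, PySem.List.slice_from_natCast]
          simp
        rw [this, hstripT]
        have hcond : (decide (1 < (List.map String.ofList ("a".toList :: v :: t)).length) &&
            ["the", "a", "an"].contains ((PySem.List.pyGet? (List.map String.ofList ("a".toList :: v :: t)) 0).getD "")) = true := by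
          rw [hget]; simp
        simp only [hcond]
        rw [if_pos trivial, hslice, hjoinT]
      · by_cases h3 : w = "an".toList
        · subst h3
          simp only [pvArticleLoop, e1, e2, e3, beq_self_eq_true, if_true, Bool.false_eq_true,
            show (("an".toList : List Char) == "the".toList) = false from by decide,
            show (("an".toList : List Char) == "a".toList) = false from by decide, if_false]
          have : PySem.Str.slice (String.ofList ("an".toList ++ ' ' :: T)) (some (PySem.Str.len "an ")) none
              = String.ofList T := by
            simp only [PySem.Str.slice, String.toList_ofList, PySem.Chars.slice_eq_listSlice]
            rw [show PySem.Str.len "an " = ((3:Nat):Int) from by decide, PySem.List.slice_from_natCast]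
            simp
          rw [this, hstripT]
          have hcond : (decide (1 < (List.map String.ofList ("an".toList :: v :: t)).length) &&
              ["the", "a", "an"].contains ((PySem.List.pyGet? (List.map String.ofList ("an".toList :: v :: t)) 0).getD "")) = true := by
            rw [hget]; simp
          simp only [hcond]
          rw [if_pos trivial, hslice, hjoinT]
        · have b1 : (w == "the".toList) = false := by simpa using h1
          have b2 : (w == "a".toList) = false := by simpa using h2
          have b3 : (w == "an".toList) = false := by simpa using h3
          simp only [pvArticleLoop, e1, e2, e3, b1, b2, b3, Bool.false_eq_true, if_false]
          have hstripAll : PySem.Str.strip (String.ofList (w ++ ' ' :: T)) = String.ofList (w ++ ' ' :: T) := by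
            have := pv_strip_join (w :: v :: t) h
            rw [pv_join_cons₂ w (v::t) (by simp), ← hT] at this
            simp [PySem.Str.strip, String.toList_ofList, this]
          rw [hstripAll]
          have hne : ∀ a : String, w ≠ a.toList → (String.ofList w == a) = false := by
            intro a hne
            simp only [beq_eq_false_iff_ne, ne_eq]
            intro hh
            exact hne (by rw [← hh]; simp)
          have hcond : (decide (1 < (List.map String.ofList (w :: v :: t)).length) &&
              ["the", "a", "an"].contains ((PySem.List.pyGet? (List.map String.ofList (w :: v :: t)) 0).getD "")) = false := by
            rw [hget]
            have c1 : ("the" == String.ofList w) = false := by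
              simp only [beq_eq_false_iff_ne, ne_eq]; intro hh; exact h1 (by simpa using (congrArg String.toList hh).symm)
            have c2 : ("a" == String.ofList w) = false := by
              simp only [beq_eq_false_iff_ne, ne_eq]; intro hh; exact h2 (by simpa using (congrArg String.toList hh).symm)
            have c3 : ("an" == String.ofList w) = false := by
              simp only [beq_eq_false_iff_ne, ne_eq]; intro hh; exact h3 (by simpa using (congrArg String.toList hh).symm)
            simp only [List.contains_cons, List.contains_nil, Bool.beq_comm]
            simp [c1, c2, c3]
          simp only [hcond]
          rw [if_neg (by simp), hJ]


theorem pv_main (name : String) : normalize_artist_name name = normalize_artist_name_alt name := by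
  simp only [normalize_artist_name, normalize_artist_name_alt]
  set cs := (PySem.Str.lower name).toList with hcs
  have hmapf : (String.toList ∘ fun c =>
      if PySem.Chars.isalnum c || PySem.Chars.isspace c then String.ofList [c] else "")
      = (fun c => if pvKeep c then [c] else []) := by
    funext c
    simp only [Function.comp_apply, pvKeep]
    split_ifs <;> simp_all
  have hfa : (PySem.Str.join "" (cs.map (fun c =>
      if PySem.Chars.isalnum c || PySem.Chars.isspace c then String.ofList [c] else ""))).toList
      = cs.filter pvKeep := by
    simp only [PySem.Str.join, String.toList_ofList, List.map_map, hmapf]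
    rw [show ("" : String).toList = [] from rfl, pv_join_filter]
  have hfb : (String.ofList (cs.filter (fun c =>
      PySem.Chars.isalnum c || PySem.Chars.isspace c))).toList = cs.filter pvKeep := by
    simp only [String.toList_ofList]
    rfl
  have hA : PySem.Str.split₀ (PySem.Str.join "" (cs.map (fun c =>
      if PySem.Chars.isalnum c || PySem.Chars.isspace c then String.ofList [c] else "")))
      = (PySem.Chars.split₀ (cs.filter pvKeep)).map String.ofList := by
    simp only [PySem.Str.split₀]; rw [hfa]
  have hB : PySem.Str.split₀ (String.ofList (cs.filter (fun c =>
      PySem.Chars.isalnum c || PySem.Chars.isspace c)))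
      = (PySem.Chars.split₀ (cs.filter pvKeep)).map String.ofList := by
    simp only [PySem.Str.split₀]; rw [hfb]
  rw [hA, hB]
  exact pv_core (PySem.Chars.split₀ (cs.filter pvKeep)) (pv_split₀_good _)

-- ===== VERDICT (by name: the statement is the Claim_ definition above) =====
theorem normalize_artist_name_spec : Claim_equal_normalize_artist_name := by
  intro name _
  unfold Spec_normalize_artist_name
  exact pv_main name
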